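-- pv_equiv track=rewrite | github.com/AlfRonDon/ReportGenBackend | app/services/fill_stage.py | approval_errors
-- ===== SOURCE A (Python) =====
-- from collections import defaultdict, Counter
-- from typing import Any, Callable, Dict, Iterable, List, Optional, Tuple
--
-- def approval_errors(mapping: Dict[str, str], unresolved_token: str = "UNRESOLVED") -> List[Dict[str, str]]:
--     rev: Dict[str, List[str]] = defaultdict(list)
--     errors: List[Dict[str, str]] = []
--     for label, choice in mapping.items():
--         if choice == unresolved_token:
--             errors.append({"label": label, "issue": unresolved_token})
--         else:
--             rev[choice].append(label)
--     for colid, labels in rev.items():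
--         if len(labels) > 1:
--             errors.append({"label": "; ".join(labels), "issue": f"Duplicate mapping to {colid}"})
--     return errors
-- ===== SOURCE B (Python) =====
-- from collections import Counter
--
-- def approval_errors(mapping, unresolved_token="UNRESOLVED"):
--     # Counting instead of grouping: no reverse index is ever built.
--     errors = [{"label": label, "issue": unresolved_token}
--               for label, choice in mapping.items() if choice == unresolved_token]
--     counts = Counter(mapping.values())
--     seen = set()
--     for choice in mapping.values():
--         if choice == unresolved_token or choice in seen:
--             continue
--         seen.add(choice)
--         if counts[choice] > 1:
--             labels = [l for l, c in mapping.items() if c == choice]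
--             errors.append({"label": "; ".join(labels),
--                            "issue": f"Duplicate mapping to {choice}"})
--     return errors
-- ===== Notes on version B (the rewrite author's own statement) =====
-- stated objective: alternative
-- what changed: B never builds a reverse index of labels: it lists unresolved entries by a direct comprehension, counts choices with a Counter, and for each first-seen duplicate choice rescans the mapping to join its labels, whereas A groups labels per choice in a dict while collecting errors in one branched loop.
import Mathlib
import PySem

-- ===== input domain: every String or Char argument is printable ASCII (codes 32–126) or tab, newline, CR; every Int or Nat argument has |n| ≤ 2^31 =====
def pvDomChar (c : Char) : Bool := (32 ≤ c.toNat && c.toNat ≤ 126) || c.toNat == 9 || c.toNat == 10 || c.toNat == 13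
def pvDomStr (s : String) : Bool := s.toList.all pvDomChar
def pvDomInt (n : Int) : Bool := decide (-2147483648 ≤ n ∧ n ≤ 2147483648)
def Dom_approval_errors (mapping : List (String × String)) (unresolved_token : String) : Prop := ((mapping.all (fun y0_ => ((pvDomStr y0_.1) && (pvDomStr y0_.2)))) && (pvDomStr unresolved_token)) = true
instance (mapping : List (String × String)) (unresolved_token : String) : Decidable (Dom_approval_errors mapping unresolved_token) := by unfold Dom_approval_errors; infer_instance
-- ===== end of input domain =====

-- B drops A's reverse index entirely: a comprehension for the unresolved entries, a Counter over the
-- choices, and a per-duplicate rescan of the mapping for the labels (same results; objective: alternative).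

-- ===== PORT A =====
def approval_errors (mapping : List (String × String)) (unresolved_token : String) : List (List (String × String)) :=
  let st := mapping.foldl
    (fun (st : PySem.Dict String (List String) × List (List (String × String))) p =>
      if p.2 == unresolved_token then
        (st.1, st.2 ++ [[("label", p.1), ("issue", unresolved_token)]])
      else
        (st.1.modify p.2 [] (fun ls => ls ++ [p.1]), st.2))
    (PySem.Dict.empty, [])
  st.1.items.foldl
    (fun errors q =>
      if 1 < PySem.List.len q.2 then
        errors ++ [[("label", PySem.Str.join "; " q.2), ("issue", "Duplicate mapping to " ++ q.1)]]
      else errors)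
    st.2

-- ===== PORT B =====
def approval_errors_alt (mapping : List (String × String)) (unresolved_token : String) : List (List (String × String)) :=
  let errors0 := (mapping.filter (fun p => p.2 == unresolved_token)).map
    (fun p => [("label", p.1), ("issue", unresolved_token)])
  let counts := PySem.Dict.counter (mapping.map Prod.snd)
  let st := (mapping.map Prod.snd).foldl
    (fun (st : PySem.Set String × List (List (String × String))) choice =>
      if choice == unresolved_token || PySem.Set.contains st.1 choice then st
      else
        (PySem.Set.add st.1 choice,
         if 1 < counts.getD choice 0 then
           st.2 ++ [[("label", PySem.Str.join "; " ((mapping.filter (fun p => p.2 == choice)).map Prod.fst)),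
                     ("issue", "Duplicate mapping to " ++ choice)]]
         else st.2))
    (PySem.Set.empty, errors0)
  st.2

-- ===== PRECONDITION & SPEC =====
def Spec_approval_errors (mapping : List (String × String)) (unresolved_token : String) (out : List (List (String × String))) : Prop := out = approval_errors_alt mapping unresolved_token
instance (mapping : List (String × String)) (unresolved_token : String) (out : List (List (String × String))) : Decidable (Spec_approval_errors mapping unresolved_token out) := by unfold Spec_approval_errors; infer_instance

-- ===== CLAIM (what is proved, stated in full; the proofs are below) =====
def Claim_equal_approval_errors : Prop := ∀ (mapping : List (String × String)) (unresolved_token : String), Dom_approval_errors mapping unresolved_token → Spec_approval_errors mapping unresolved_token (approval_errors mapping unresolved_token)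

-- ===== LEMMAS AND PROOFS =====

-- find? over the non-token entries agrees with find? over all entries for a non-token key
theorem pv_find_filter (tok k : String) (h : k ≠ tok) (its : List (String × List String)) :
    (its.filter (fun p => p.1 != tok)).find? (fun p => p.1 == k) = its.find? (fun p => p.1 == k) := by
  induction its with
  | nil => rfl
  | cons a l ih =>
    by_cases ha : a.1 = tok
    · rw [List.filter_cons, if_neg (by simp [ha]),
        List.find?_cons_of_neg (by simp [ha]; exact fun hh => h hh.symm), ih]
    · by_cases hk : a.1 = k
      · rw [List.filter_cons, if_pos (by simp [ha]),
          List.find?_cons_of_pos (by simp [hk]), List.find?_cons_of_pos (by simp [hk])]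
      · rw [List.filter_cons, if_pos (by simp [ha]),
          List.find?_cons_of_neg (by simp [hk]), List.find?_cons_of_neg (by simp [hk]), ih]

-- lookups for non-token keys see through the filter relation
theorem pv_get_rel (tok k : String) (h : k ≠ tok) (g rev : PySem.Dict String (List String))
    (hrel : rev.items = g.items.filter (fun p => p.1 != tok)) :
    rev.get? k = g.get? k := by
  simp [PySem.Dict.get?, hrel, pv_find_filter tok k h]

theorem pv_getD_rel (tok k : String) (h : k ≠ tok) (g rev : PySem.Dict String (List String))
    (hrel : rev.items = g.items.filter (fun p => p.1 != tok)) :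
    rev.getD k [] = g.getD k [] := by
  rw [PySem.Dict.getD_eq_get?_getD, PySem.Dict.getD_eq_get?_getD, pv_get_rel tok k h g rev hrel]

theorem pv_contains_rel (tok k : String) (h : k ≠ tok) (g rev : PySem.Dict String (List String))
    (hrel : rev.items = g.items.filter (fun p => p.1 != tok)) :
    rev.contains k = g.contains k := by
  rw [PySem.Dict.contains_eq_isSome_get?, PySem.Dict.contains_eq_isSome_get?,
    pv_get_rel tok k h g rev hrel]

-- the filter relation is preserved by one modify step (the token key is dropped by A)
theorem pv_step_rel (tok k : String) (v : String) (g rev : PySem.Dict String (List String))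
    (hrel : rev.items = g.items.filter (fun p => p.1 != tok)) :
    (if k = tok then rev else rev.modify k [] (fun ls => ls ++ [v])).items
      = (g.modify k [] (fun ls => ls ++ [v])).items.filter (fun p => p.1 != tok) := by
  by_cases hk : k = tok
  · subst hk
    rw [if_pos rfl]
    simp only [PySem.Dict.modify, PySem.Dict.items_insert]
    by_cases hc : g.contains k = true
    · rw [if_pos hc, List.filter_map,
        List.filter_congr (q := fun p => p.1 != k)
          (fun q _ => by by_cases hq : q.1 = k <;> simp [Function.comp, hq]),
        hrel,
        List.map_congr_left (g := fun q => q) (fun q hq => by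
          have hqk := List.of_mem_filter hq
          simp at hqk ⊢
          intro h'; exact absurd h' hqk),
        List.map_id']
    · rw [if_neg hc, List.filter_append, hrel]
      simp
  · rw [if_neg hk]
    simp only [PySem.Dict.modify, PySem.Dict.items_insert,
      pv_getD_rel tok k hk g rev hrel, pv_contains_rel tok k hk g rev hrel]
    by_cases hc : g.contains k = true
    · rw [if_pos hc, if_pos hc, List.filter_map,
        List.filter_congr (q := fun p => p.1 != tok)
          (fun q _ => by by_cases hq : q.1 = k <;> simp [Function.comp, hq]),
        hrel]
    · rw [if_neg hc, if_neg hc, List.filter_append, hrel]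
      simp [hk]

-- A's interleaved loop, characterised: index of the non-token entries + the unresolved errors
theorem pv_loopA (tok : String) (l : List (String × String)) :
    ∀ (g rev : PySem.Dict String (List String)) (errs : List (List (String × String))),
    rev.items = g.items.filter (fun p => p.1 != tok) →
    l.foldl
      (fun (st : PySem.Dict String (List String) × List (List (String × String))) p =>
        if p.2 == tok then
          (st.1, st.2 ++ [[("label", p.1), ("issue", tok)]])
        else
          (st.1.modify p.2 [] (fun ls => ls ++ [p.1]), st.2))
      (rev, errs)
      = (PySem.Dict.mk ((l.foldl
            (fun (g : PySem.Dict String (List String)) p => g.modify p.2 [] (fun ls => ls ++ [p.1]))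
            g).items.filter (fun p => p.1 != tok)),
          errs ++ (l.filter (fun p => p.2 == tok)).map
            (fun p => [("label", p.1), ("issue", tok)])) := by
  induction l with
  | nil =>
    intro g rev errs hrel
    simp only [List.foldl_nil, List.filter_nil, List.map_nil, List.append_nil]
    rw [← hrel]
  | cons p l ih =>
    intro g rev errs hrel
    by_cases hp : p.2 = tok
    · have hstep := pv_step_rel tok p.2 p.1 g rev hrel
      rw [if_pos hp] at hstep
      have hb : (p.2 == tok) = true := by simp [hp]
      rw [List.foldl_cons, List.foldl_cons, List.filter_cons, if_pos hb, if_pos hb,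
        ih (g.modify p.2 [] (fun ls => ls ++ [p.1])) rev _ hstep]
      simp
    · have hstep := pv_step_rel tok p.2 p.1 g rev hrel
      rw [if_neg hp] at hstep
      have hb : ¬ ((p.2 == tok) = true) := by simp [hp]
      rw [List.foldl_cons, List.foldl_cons, List.filter_cons, if_neg hb, if_neg hb,
        ih (g.modify p.2 [] (fun ls => ls ++ [p.1])) _ _ hstep]

-- Set.update only appends
theorem pv_update_prefix (cs : List String) : ∀ s : List String,
    ∃ t, PySem.Set.update s cs = s ++ t := by
  induction cs with
  | nil => intro s; exact ⟨[], by simp [PySem.Set.update]⟩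
  | cons c cs ih =>
    intro s
    by_cases hc : c ∈ s
    · obtain ⟨t, ht⟩ := ih s
      exact ⟨t, by simpa [PySem.Set.update, PySem.Set.add, PySem.Set.contains, hc] using ht⟩
    · obtain ⟨t, ht⟩ := ih (s ++ [c])
      exact ⟨c :: t, by simpa [PySem.Set.update, PySem.Set.add, PySem.Set.contains, hc] using ht⟩

-- B's seen-set loop = a plain fold over the deduplicated non-token choices
theorem pv_seen (tok : String)
    (step : List (List (String × String)) → String → List (List (String × String)))
    (cs : List String) : ∀ (s : PySem.Set String) (errs : List (List (String × String))),
    cs.foldl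
      (fun (st : PySem.Set String × List (List (String × String))) c =>
        if c == tok || PySem.Set.contains st.1 c then st
        else (PySem.Set.add st.1 c, step st.2 c)) (s, errs)
      = (PySem.Set.update s (cs.filter (fun c => c != tok)),
         ((PySem.Set.update s (cs.filter (fun c => c != tok))).drop s.length).foldl step errs) := by
  induction cs with
  | nil =>
    intro s errs
    simp [PySem.Set.update]
  | cons c cs ih =>
    intro s errs
    by_cases htok : c = tok
    · simp only [List.foldl_cons, List.filter_cons, htok]
      rw [if_pos (by simp), if_neg (by simp)]
      exact ih s errs
    · by_cases hc : c ∈ s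
      · simp only [List.foldl_cons, List.filter_cons]
        rw [if_pos (by simp [PySem.Set.contains, hc]), if_pos (by simp [htok])]
        have : PySem.Set.update s (c :: cs.filter (fun c => c != tok))
            = PySem.Set.update s (cs.filter (fun c => c != tok)) := by
          simp [PySem.Set.update, PySem.Set.add, PySem.Set.contains, hc]
        rw [this]; exact ih s errs
      · simp only [List.foldl_cons, List.filter_cons]
        rw [if_neg (by simp [PySem.Set.contains, hc, htok]), if_pos (by simp [htok])]
        have hadd : PySem.Set.add s c = s ++ [c] := by
          simp [PySem.Set.add, PySem.Set.contains, hc]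
        have hupd : PySem.Set.update s (c :: cs.filter (fun c => c != tok))
            = PySem.Set.update (s ++ [c]) (cs.filter (fun c => c != tok)) := by
          simp [PySem.Set.update, hadd]
        rw [hadd, ih (s ++ [c]) (step errs c), hupd]
        obtain ⟨t, ht⟩ := pv_update_prefix (cs.filter (fun c => c != tok)) (s ++ [c])
        rw [ht]
        have h1 : List.drop (s ++ [c]).length (s ++ [c] ++ t) = t := by simp
        have h2 : List.drop s.length (s ++ [c] ++ t) = c :: t := by
          rw [List.append_assoc, List.drop_append_of_le_length (by simp)]
          simp
        rw [h1, h2, List.foldl_cons]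

-- dedup commutes with filter
theorem pv_update_filter (p : String → Bool) (cs : List String) : ∀ s : List String,
    PySem.Set.update (s.filter p) (cs.filter p) = (PySem.Set.update s cs).filter p := by
  induction cs with
  | nil => intro s; simp [PySem.Set.update]
  | cons c cs ih =>
    intro s
    have hupd : ∀ (x : String) (u l : List String),
        PySem.Set.update u (x :: l) = PySem.Set.update (PySem.Set.add u x) l := by
      intro x u l; simp [PySem.Set.update]
    by_cases hp : p c = true
    · have hadd : PySem.Set.add (s.filter p) c = (PySem.Set.add s c).filter p := by
        by_cases hc : c ∈ s
        · simp [PySem.Set.add, PySem.Set.contains, List.mem_filter, hc, hp]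
        · simp [PySem.Set.add, PySem.Set.contains, List.mem_filter, hc, hp, List.filter_append]
      rw [List.filter_cons, if_pos hp, hupd, hupd, hadd, ih]
    · have hadd : (PySem.Set.add s c).filter p = s.filter p := by
        by_cases hc : c ∈ s <;>
          simp [PySem.Set.add, PySem.Set.contains, hc, List.filter_append, hp]
      rw [List.filter_cons, if_neg (by simp [hp]), hupd, ← ih (PySem.Set.add s c), hadd]

-- the grouped labels of a choice are its mapping-order labels
theorem pv_group_getD (l : List (String × String)) (c : String) :
    (l.foldl (fun (g : PySem.Dict String (List String)) p => g.modify p.2 [] (fun ls => ls ++ [p.1]))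
      PySem.Dict.empty).getD c []
      = (l.filter (fun p => p.2 == c)).map Prod.fst := by
  have hm : l.foldl (fun (g : PySem.Dict String (List String)) p => g.modify p.2 [] (fun ls => ls ++ [p.1]))
        PySem.Dict.empty
      = (l.map (fun p => (p.2, p.1))).foldl
        (fun (g : PySem.Dict String (List String)) p => g.modify p.1 [] (fun ls => ls ++ [p.2]))
        PySem.Dict.empty := by
    rw [List.foldl_map]
  rw [hm, PySem.Dict.getD_foldl_modify_append]
  simp [List.filter_map, Function.comp_def]

-- the grouping dict's items, as a map over the deduplicated choice list
theorem pv_group_items (l : List (String × String)) :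
    (l.foldl (fun (g : PySem.Dict String (List String)) p => g.modify p.2 [] (fun ls => ls ++ [p.1]))
      PySem.Dict.empty).items
      = (PySem.Set.ofList (l.map Prod.snd)).map
          (fun c => (c, (l.filter (fun p => p.2 == c)).map Prod.fst)) := by
  have hnd : (l.foldl (fun (g : PySem.Dict String (List String)) p => g.modify p.2 [] (fun ls => ls ++ [p.1]))
      PySem.Dict.empty).keys.Nodup := by
    apply PySem.Dict.nodup_keys_foldl_modify_key
    exact PySem.Dict.nodup_keys_empty
  have hkeys : (l.foldl (fun (g : PySem.Dict String (List String)) p => g.modify p.2 [] (fun ls => ls ++ [p.1]))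
      PySem.Dict.empty).keys = PySem.Set.ofList (l.map Prod.snd) := by
    rw [PySem.Dict.keys_foldl_modify_key]
    simp [PySem.Set.update, PySem.Set.ofList_eq_foldl, PySem.Dict.keys_empty]
  rw [PySem.Dict.items_eq_map_keys _ hnd [], hkeys]
  exact List.map_congr_left (fun c _ => by rw [pv_group_getD])

-- ===== VERDICT (by name: the statement is the Claim_ definition above) =====
theorem approval_errors_spec : Claim_equal_approval_errors := by
  intro mapping tok _
  unfold Spec_approval_errors approval_errors approval_errors_alt
  rw [pv_loopA tok mapping PySem.Dict.empty PySem.Dict.empty [] rfl]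
  dsimp only
  rw [pv_seen tok
    (fun errs c =>
      if 1 < (PySem.Dict.counter (mapping.map Prod.snd)).getD c 0 then
        errs ++ [[("label", PySem.Str.join "; " ((mapping.filter (fun p => p.2 == c)).map Prod.fst)),
                  ("issue", "Duplicate mapping to " ++ c)]]
      else errs)
    (mapping.map Prod.snd) PySem.Set.empty]
  rw [show (PySem.Set.empty : PySem.Set String) = ([] : List String).filter (fun c => c != tok) by rfl]
  rw [pv_update_filter (fun c => c != tok) (mapping.map Prod.snd) []]
  rw [pv_group_items mapping]
  rw [List.filter_map, List.foldl_map]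
  rw [show PySem.Set.update ([] : List String) (mapping.map Prod.snd)
        = PySem.Set.ofList (mapping.map Prod.snd) by
      simp [PySem.Set.update, PySem.Set.ofList_eq_foldl]]
  apply PySem.List.foldl_congr_mem
  intro acc c hc
  have hcount : (PySem.Dict.counter (mapping.map Prod.snd)).getD c 0
      = ((mapping.map Prod.snd).count c : Int) := PySem.Dict.getD_counter _ _
  have hlen : PySem.List.len ((mapping.filter (fun p => p.2 == c)).map Prod.fst)
      = ((mapping.map Prod.snd).count c : Int) := by
    simp [PySem.List.len, List.count, BEq.beq, List.countP_eq_length_filter,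
      List.filter_map, Function.comp_def]
  simp only [hcount, hlen]
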